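-- pv_equiv track=rewrite | github.com/Intelligent-CAT-Lab/Croissant | scripts/scripts/3_mutation/old_mutate_script.py | parse_mutation_result
-- ===== SOURCE A (Python) =====
-- def parse_mutation_result(output):
--     outputList = output.split("\n")
--     failure = 0
--     error = 0
--     mutants = 0
--     execution_time = 0
--
--     for elem in outputList:
--
--         if ("Failures:" in elem):
--             parsed = elem.split(": ")
--             failure = int(parsed[1])
--
--         if ("Errors:" in elem):
--             parsed = elem.split(": ")
--             error = int(parsed[1])
--
--         if ("Mutant number:" in elem):
--             parsed = elem.split(": ")
--             mutants = int(parsed[1])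
--
--         if ("Execution took:" in elem):
--             parsed = elem.split(": ")
--             execution_time = int(parsed[1].replace(" miliseconds",""))
--
--
--
--     result = [failure, error, mutants, execution_time]
--     return result
-- ===== SOURCE B (Python) =====
-- def parse_mutation_result(output):
--     lines = output.split("\n")
--
--     def find(marker, suffix=None):
--         last = None
--         for line in lines:
--             if marker in line:
--                 last = line
--         if last is None:
--             return 0
--         value = last.split(": ")[1]
--         if suffix is not None:
--             value = value.replace(suffix, "")
--         return int(value)
--
--     return [find("Failures:"),
--             find("Errors:"),
--             find("Mutant number:"),
--             find("Execution took:", " miliseconds")]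
-- ===== Notes on version B (the rewrite author's own statement) =====
-- stated objective: simpler
-- what changed: Replaces A's single combined loop with four repeated inline split/int blocks by one shared find(marker, suffix) helper that keeps the last matching line per marker and parses it once, called four times.
import Mathlib
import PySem

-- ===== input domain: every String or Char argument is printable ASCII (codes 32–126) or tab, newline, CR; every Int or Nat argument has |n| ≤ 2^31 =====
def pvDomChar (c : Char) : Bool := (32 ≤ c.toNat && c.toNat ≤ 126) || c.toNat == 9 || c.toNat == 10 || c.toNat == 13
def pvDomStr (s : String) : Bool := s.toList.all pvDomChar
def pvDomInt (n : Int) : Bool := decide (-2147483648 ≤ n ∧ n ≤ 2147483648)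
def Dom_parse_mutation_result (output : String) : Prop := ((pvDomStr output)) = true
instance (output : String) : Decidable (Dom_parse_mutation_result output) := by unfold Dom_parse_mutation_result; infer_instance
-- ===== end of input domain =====

-- B replaces A's single combined loop over the lines by four independent last-match scans
-- built from one shared helper (objective: simpler decomposition; return value only, no speed claim).

-- ===== PORT A =====
-- s.split(sep) with a non-empty literal sep: split? is some there, getD [] never fires
def pvSplit (s sep : String) : List String := (PySem.Str.split? s sep).getD []

-- int(elem.split(": ")[1]); total form with defaults, exact under Pre_ (Python raises exactly where
-- pyGet?/ofStr? are none, and Pre_ excludes those inputs)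
def pvParseA (elem : String) : Int :=
  (PySem.Int.ofStr? ((PySem.List.pyGet? (pvSplit elem ": ") 1).getD "")).getD 0

-- int(elem.split(": ")[1].replace(" miliseconds", "")); same convention
def pvParseAExec (elem : String) : Int :=
  (PySem.Int.ofStr? (PySem.Str.replace ((PySem.List.pyGet? (pvSplit elem ": ") 1).getD "") " miliseconds" "")).getD 0

def parse_mutation_result (output : String) : List Int :=
  let outputList := pvSplit output "\n"
  let st := outputList.foldl
    (fun (st : Int × Int × Int × Int) elem =>
      let failure := if PySem.Str.isIn "Failures:" elem then pvParseA elem else st.1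
      let error := if PySem.Str.isIn "Errors:" elem then pvParseA elem else st.2.1
      let mutants := if PySem.Str.isIn "Mutant number:" elem then pvParseA elem else st.2.2.1
      let execution_time := if PySem.Str.isIn "Execution took:" elem then pvParseAExec elem else st.2.2.2
      (failure, error, mutants, execution_time))
    (0, 0, 0, 0)
  [st.1, st.2.1, st.2.2.1, st.2.2.2]

-- ===== PORT B =====
-- helper find(marker, suffix=None): last line containing marker, parsed via split(": ")[1]
-- (suffix stripped when given), 0 if no line matches; same total-form defaults as A's port
def pvFind (lines : List String) (marker : String) (suffix : Option String) : Int :=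
  let last := lines.foldl (fun (acc : Option String) line =>
    if PySem.Str.isIn marker line then some line else acc) none
  match last with
  | none => 0
  | some l =>
    let value := (PySem.List.pyGet? (pvSplit l ": ") 1).getD ""
    let value := match suffix with
      | some suf => PySem.Str.replace value suf ""
      | none => value
    (PySem.Int.ofStr? value).getD 0

def parse_mutation_result_alt (output : String) : List Int :=
  let lines := pvSplit output "\n"
  [pvFind lines "Failures:" none,
   pvFind lines "Errors:" none,
   pvFind lines "Mutant number:" none,
   pvFind lines "Execution took:" (some " miliseconds")]

-- ===== PRECONDITION & SPEC =====
-- 'marker in elem implies the field parses': split(": ") has a second piece and int() accepts it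
def pvParses (elem : String) (suffix : Option String) : Bool :=
  match PySem.List.pyGet? (pvSplit elem ": ") 1 with
  | none => false
  | some v =>
    (PySem.Int.ofStr? (match suffix with
      | some suf => PySem.Str.replace v suf ""
      | none => v)).isSome

def pvLineOk (elem : String) : Bool :=
  (!PySem.Str.isIn "Failures:" elem || pvParses elem none) &&
  (!PySem.Str.isIn "Errors:" elem || pvParses elem none) &&
  (!PySem.Str.isIn "Mutant number:" elem || pvParses elem none) &&
  (!PySem.Str.isIn "Execution took:" elem || pvParses elem (some " miliseconds"))

-- Pre_ excludes exactly the inputs where Python A raises (IndexError/ValueError on a line that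
-- contains one of the four markers but whose ': '-second-piece is missing or not an int).
def Pre_parse_mutation_result (output : String) : Prop :=
  ((pvSplit output "\n").all pvLineOk) = true

instance (output : String) : Decidable (Pre_parse_mutation_result output) := by
  unfold Pre_parse_mutation_result; infer_instance

def pvWitness_parse_mutation_result : String :=
  "Failures: 3\nErrors: 0\nMutant number: 12\nExecution took: 55 miliseconds"

def Spec_parse_mutation_result (output : String) (out : List Int) : Prop :=
  out = parse_mutation_result_alt output

instance (output : String) (out : List Int) : Decidable (Spec_parse_mutation_result output out) := by
  unfold Spec_parse_mutation_result; infer_instance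

-- ===== CLAIM (what is proved, stated in full; the proofs are below) =====
def Claim_equal_parse_mutation_result : Prop :=
  ∀ (output : String), Dom_parse_mutation_result output →
    Pre_parse_mutation_result output →
    Spec_parse_mutation_result output (parse_mutation_result output)

-- ===== LEMMAS AND PROOFS =====

-- B's last-match-then-parse scan computes the same value as A's parse-every-match overwrite loop.
theorem pv_last_parse (parse : String → Int) (p : String → Bool) (lines : List String) :
    ∀ (acc : Option String) (v : Int),
      lines.foldl (fun w e => if p e then parse e else w) (acc.elim v parse)
      = (lines.foldl (fun a l => if p l then some l else a) acc).elim v parse := by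
  induction lines with
  | nil => intro acc v; rfl
  | cons e t ih =>
    intro acc v
    simp only [List.foldl_cons]
    by_cases h : p e
    · rw [if_pos h, if_pos h]; exact ih (some e) v
    · rw [if_neg h, if_neg h]; exact ih acc v

-- A's 4-tuple fold is the product of four independent folds.
theorem pv_tuple_fold (lines : List String) :
    ∀ (a b c d : Int),
      lines.foldl
        (fun (st : Int × Int × Int × Int) elem =>
          (if PySem.Str.isIn "Failures:" elem then pvParseA elem else st.1,
           if PySem.Str.isIn "Errors:" elem then pvParseA elem else st.2.1,
           if PySem.Str.isIn "Mutant number:" elem then pvParseA elem else st.2.2.1,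
           if PySem.Str.isIn "Execution took:" elem then pvParseAExec elem else st.2.2.2))
        (a, b, c, d)
      = (lines.foldl (fun w e => if PySem.Str.isIn "Failures:" e then pvParseA e else w) a,
         lines.foldl (fun w e => if PySem.Str.isIn "Errors:" e then pvParseA e else w) b,
         lines.foldl (fun w e => if PySem.Str.isIn "Mutant number:" e then pvParseA e else w) c,
         lines.foldl (fun w e => if PySem.Str.isIn "Execution took:" e then pvParseAExec e else w) d) := by
  induction lines with
  | nil => intro a b c d; rfl
  | cons e t ih =>
    intro a b c d
    simp only [List.foldl_cons]
    exact ih _ _ _ _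

theorem pvFind_eq (lines : List String) (marker : String) (suffix : Option String) (parse : String → Int)
    (hp : ∀ l, parse l = (PySem.Int.ofStr? (match suffix with
      | some suf => PySem.Str.replace ((PySem.List.pyGet? (pvSplit l ": ") 1).getD "") suf ""
      | none => (PySem.List.pyGet? (pvSplit l ": ") 1).getD "")).getD 0) :
    lines.foldl (fun w e => if PySem.Str.isIn marker e then parse e else w) 0
      = pvFind lines marker suffix := by
  have h := pv_last_parse parse (fun l => PySem.Str.isIn marker l) lines none 0
  simp only [Option.elim] at h
  unfold pvFind
  dsimp only
  rw [h]
  cases List.foldl (fun (a : Option String) l => if PySem.Str.isIn marker l then some l else a) none lines with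
  | none => rfl
  | some l => exact hp l

-- ===== VERDICT (by name: the statement is the Claim_ definition above) =====
theorem parse_mutation_result_spec : Claim_equal_parse_mutation_result := by
  intro output _ _
  unfold Spec_parse_mutation_result parse_mutation_result parse_mutation_result_alt
  dsimp only
  rw [pv_tuple_fold]
  rw [pvFind_eq _ _ none pvParseA (fun l => rfl),
      pvFind_eq _ _ none pvParseA (fun l => rfl),
      pvFind_eq _ _ none pvParseA (fun l => rfl),
      pvFind_eq _ _ (some " miliseconds") pvParseAExec (fun l => rfl)]
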